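-- pv_equiv track=rewrite | github.com/TitanBlueProgramming/Adventofcode | D_11.py | decreasing
-- ===== SOURCE A (Python) =====
-- def decreasing(data):
--
--     decdata = []
--
--     for i in range(len(data)):
--         flag = False
--         for k in range(len(data[i]) - 1):
--             if data[i][k] > data[i][k + 1]:
--                 flag = True
--             else:
--                 flag = False
--             if flag == False:
--                 break
--         if flag == True:
--             decdata.append(data[i])
--
--     return decdata
-- ===== SOURCE B (Python) =====
-- def decreasing(data):
--     # Simpler: keep rows that are a strictly-descending sequence (sort-and-compare
--     # plus a distinctness check), matching A's exclusion of rows shorter than 2.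
--     return [row for row in data
--             if len(row) > 1 and row == sorted(row, reverse=True)
--             and len(set(row)) == len(row)]
-- ===== Notes on version B (the rewrite author's own statement) =====
-- stated objective: simpler
-- what changed: Replaced the index-based nested loop with a manual flag/break by a single list comprehension that keeps a row when it equals its descending sort and has no duplicate elements (sort-and-compare instead of an adjacent-pair scan).
import Mathlib
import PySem

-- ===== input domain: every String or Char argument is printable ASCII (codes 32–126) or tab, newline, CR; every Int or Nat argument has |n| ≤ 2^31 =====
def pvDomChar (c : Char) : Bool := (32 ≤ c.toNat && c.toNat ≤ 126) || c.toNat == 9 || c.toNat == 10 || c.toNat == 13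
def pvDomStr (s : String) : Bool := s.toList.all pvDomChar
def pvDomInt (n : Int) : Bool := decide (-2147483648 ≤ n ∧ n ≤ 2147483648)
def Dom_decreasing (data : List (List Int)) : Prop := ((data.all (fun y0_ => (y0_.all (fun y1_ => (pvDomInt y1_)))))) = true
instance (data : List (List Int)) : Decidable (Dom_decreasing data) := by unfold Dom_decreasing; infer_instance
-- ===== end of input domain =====

-- B replaces A's nested index loop (flag + break) by one comprehension keeping a row
-- when it equals its descending sort and has no duplicates; objective: simpler.

-- ===== PORT A =====
-- inner loop `for k in range(len(row)-1): flag = row[k] > row[k+1]; if not flag: break`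
def pvAGo (row : List Int) : List Nat → Bool → Bool
  | [], flag => flag
  | k :: rest, _ =>
    let flag := decide (PySem.List.pyGetD row ((k : Int)) 0 > PySem.List.pyGetD row ((k : Int) + 1) 0)
    if flag = false then flag else pvAGo row rest flag

def decreasing (data : List (List Int)) : List (List Int) :=
  data.foldl (fun decdata row =>
    if pvAGo row (List.range (row.length - 1)) false = true then decdata ++ [row] else decdata) []

-- ===== PORT B =====
def decreasing_alt (data : List (List Int)) : List (List Int) :=
  data.filter (fun row =>
    decide (1 < row.length) &&
    (row == PySem.List.sorted row (fun x => x) true) &&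
    ((PySem.Set.ofList row).length == row.length))

-- ===== PRECONDITION & SPEC =====
def Spec_decreasing (data : List (List Int)) (out : List (List Int)) : Prop := out = decreasing_alt data
instance (data : List (List Int)) (out : List (List Int)) : Decidable (Spec_decreasing data out) := by unfold Spec_decreasing; infer_instance

-- ===== CLAIM (what is proved, stated in full; the proofs are below) =====
def Claim_equal_decreasing : Prop := ∀ (data : List (List Int)), Dom_decreasing data → Spec_decreasing data (decreasing data)

-- ===== LEMMAS AND PROOFS =====

theorem pvAGo_cons (row : List Int) (k : Nat) (rest : List Nat) (b : Bool) :
    pvAGo row (k :: rest) b =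
      (if (decide (PySem.List.pyGetD row ((k : Int)) 0 > PySem.List.pyGetD row ((k : Int) + 1) 0)) = false
       then (decide (PySem.List.pyGetD row ((k : Int)) 0 > PySem.List.pyGetD row ((k : Int) + 1) 0))
       else pvAGo row rest (decide (PySem.List.pyGetD row ((k : Int)) 0 > PySem.List.pyGetD row ((k : Int) + 1) 0))) :=
  rfl

-- A's inner loop on a nonempty index list is 'all adjacent pairs decrease'
theorem pvAGo_eq_all (row : List Int) :
    ∀ (ks : List Nat) (b : Bool), ks ≠ [] →
      pvAGo row ks b =
        ks.all (fun k => decide (PySem.List.pyGetD row ((k : Int)) 0 > PySem.List.pyGetD row ((k : Int) + 1) 0)) := by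
  intro ks
  induction ks with
  | nil => intro b h; exact absurd rfl h
  | cons k rest ih =>
    intro b _
    rw [pvAGo_cons, List.all_cons]
    cases hd : decide (PySem.List.pyGetD row ((k : Int)) 0 > PySem.List.pyGetD row ((k : Int) + 1) 0) with
    | false => simp
    | true =>
      cases rest with
      | nil => simp [pvAGo]
      | cons r t => rw [ih true (by simp)]; simp

theorem nodup_of_ofList_length (xs : List Int)
    (h : (PySem.Set.ofList xs).length = xs.length) : xs.Nodup := by
  have hperm : (PySem.Set.ofList xs).Perm xs.dedup := by
    rw [List.perm_ext_iff_of_nodup (PySem.Set.nodup_ofList xs) (List.nodup_dedup xs)]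
    intro a
    rw [PySem.Set.mem_ofList, List.mem_dedup]
  have hlen : xs.dedup.length = xs.length := by
    rw [← hperm.length_eq, h]
  have : xs.dedup = xs := (List.dedup_sublist xs).eq_of_length hlen
  rw [← this]; exact List.nodup_dedup xs

-- the adjacency scan over range(len-1) tests exactly the strict-descent chain
theorem all_range_iff_isChain (row : List Int) (hn : 1 < row.length) :
    ((List.range (row.length - 1)).all
        (fun k => decide (PySem.List.pyGetD row ((k : Int)) 0 > PySem.List.pyGetD row ((k : Int) + 1) 0))) = true ↔
      row.IsChain (· > ·) := by
  rw [List.isChain_iff_getElem]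
  simp only [List.all_eq_true, List.mem_range, decide_eq_true_eq]
  constructor
  · intro h i hi
    have := h i (by omega)
    rwa [PySem.List.pyGetD_natCast, show ((i : Int) + 1) = ((i + 1 : Nat) : Int) by push_cast; ring,
      PySem.List.pyGetD_natCast, List.getD_eq_getElem row 0 (by omega),
      List.getD_eq_getElem row 0 (by omega)] at this
  · intro h k hk
    have := h k (by omega)
    rwa [PySem.List.pyGetD_natCast, show ((k : Int) + 1) = ((k + 1 : Nat) : Int) by push_cast; ring,
      PySem.List.pyGetD_natCast, List.getD_eq_getElem row 0 (by omega),
      List.getD_eq_getElem row 0 (by omega)]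

-- the per-row predicates of the two programs agree
theorem row_pred_eq (row : List Int) :
    pvAGo row (List.range (row.length - 1)) false =
      (decide (1 < row.length) &&
       (row == PySem.List.sorted row (fun x => x) true) &&
       ((PySem.Set.ofList row).length == row.length)) := by
  by_cases hn : 1 < row.length
  · have hne : List.range (row.length - 1) ≠ [] := by
      simp [List.range_eq_nil]; omega
    rw [pvAGo_eq_all row _ false hne]
    by_cases hc : row.IsChain (· > ·)
    · have hpw : row.Pairwise (fun a b : Int => b < a) := hc.pairwise
      have hsorted : PySem.List.sorted row (fun x => x) true = row :=
        PySem.List.sorted_rev_eq_of_perm_of_pairwise_gt row row (fun x => x) (List.Perm.refl row) hpw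
      have hnd : row.Nodup := hpw.imp (fun h => (ne_of_gt h))
      rw [(all_range_iff_isChain row hn).mpr hc]
      simp [hn, hsorted, PySem.Set.ofList_eq_self_of_nodup row hnd]
    · have hL : ((List.range (row.length - 1)).all
          (fun k => decide (PySem.List.pyGetD row ((k : Int)) 0 > PySem.List.pyGetD row ((k : Int) + 1) 0))) = false := by
        cases hb : ((List.range (row.length - 1)).all
            (fun k => decide (PySem.List.pyGetD row ((k : Int)) 0 > PySem.List.pyGetD row ((k : Int) + 1) 0))) with
        | false => rfl
        | true => exact absurd ((all_range_iff_isChain row hn).mp hb) hc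
      rw [hL]
      cases hb : (decide (1 < row.length) &&
          (row == PySem.List.sorted row (fun x => x) true) &&
          ((PySem.Set.ofList row).length == row.length)) with
      | false => rfl
      | true =>
        exfalso
        rw [Bool.and_eq_true, Bool.and_eq_true] at hb
        obtain ⟨⟨_, hs⟩, h2⟩ := hb
        have hs' : row = PySem.List.sorted row (fun x => x) true := beq_iff_eq.mp hs
        have hnd : row.Nodup := nodup_of_ofList_length row (Nat.beq_eq_true_eq _ _ ▸ h2)
        have hge : row.Pairwise (fun a b : Int => b ≤ a) := by
          rw [hs']; exact PySem.List.sorted_pairwise_rev row (fun x => x)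
        have hgt : row.Pairwise (fun a b : Int => a > b) :=
          (hge.and hnd).imp (fun h => lt_of_le_of_ne h.1 (Ne.symm h.2))
        exact hc (List.isChain_iff_pairwise.mpr hgt)
  · -- short row: range is empty, A's flag stays False; B's length guard fails
    have h0 : row.length - 1 = 0 := by omega
    simp [h0, pvAGo, hn]

theorem decreasing_eq_alt : ∀ data, decreasing data = decreasing_alt data := by
  intro data
  unfold decreasing decreasing_alt
  rw [show (fun (decdata : List (List Int)) row =>
        if pvAGo row (List.range (row.length - 1)) false = true then decdata ++ [row] else decdata)
      = (fun decdata row => if (decide (1 < row.length) &&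
          (row == PySem.List.sorted row (fun x => x) true) &&
          ((PySem.Set.ofList row).length == row.length)) = true then decdata ++ [row] else decdata) by
    funext decdata row; rw [row_pred_eq]]
  rw [PySem.List.foldl_append_if _ (fun r => r) data []]
  simp

-- ===== VERDICT (by name: the statement is the Claim_ definition above) =====
theorem decreasing_spec : Claim_equal_decreasing := by
  intro data _
  unfold Spec_decreasing
  exact decreasing_eq_alt data
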